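-- pv_equiv track=rewrite | github.com/kandation/CPE305-OS | 02-PageFault/page_fulat.py | ref_string_sorted
-- ===== SOURCE A (Python) =====
-- def ref_string_sorted(L ,k):
--     n = L//k
--     list_num = []
--     if L > k:
--         # loop post number
--         for i in range(0, k-1):
--             for j in range(0, n):
--                 list_num.append(i)
--
--         #loop last number overwise
--         last_other = L - len(list_num)
--         for a in range(0, last_other):
--             list_num.append(k-1)
--     else:
--         for i in range(0, L):
--             list_num.append(i)
--
--     return list_num
-- ===== SOURCE B (Python) =====
-- def ref_string_sorted(L, k):
--     n = L // k
--     if L > k: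
--         return [min(i // n, k - 1) for i in range(L)]
--     return list(range(L))
-- ===== Notes on version B (the rewrite author's own statement) =====
-- stated objective: alternative
-- what changed: A builds the list with nested block-append loops (k-1 blocks of n copies) plus a remainder loop; B makes one flat pass over range(L) assigning each position i the closed-form value min(i // n, k - 1).
-- outside the precondition, e.g. on ref_string_sorted(10, 0): A raises ZeroDivisionError, B raises ZeroDivisionError
import Mathlib
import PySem

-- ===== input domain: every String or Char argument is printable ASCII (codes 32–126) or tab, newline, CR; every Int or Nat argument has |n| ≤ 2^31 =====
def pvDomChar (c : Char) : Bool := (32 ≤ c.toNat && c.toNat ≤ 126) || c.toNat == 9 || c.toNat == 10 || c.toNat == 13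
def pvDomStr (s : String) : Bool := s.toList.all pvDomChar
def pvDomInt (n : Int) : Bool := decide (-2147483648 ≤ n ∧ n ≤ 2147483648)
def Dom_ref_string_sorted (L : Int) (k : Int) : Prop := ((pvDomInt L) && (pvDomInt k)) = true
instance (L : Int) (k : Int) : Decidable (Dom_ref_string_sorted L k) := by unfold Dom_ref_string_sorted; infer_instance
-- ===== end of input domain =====

-- B replaces A's nested block-append loops plus tail loop by one flat position-indexed
-- pass (value at position i is min(i // n, k - 1)); objective: alternative decomposition.

-- ===== PORT A =====
def ref_string_sorted (L : Int) (k : Int) : List Int :=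
  let n := PySem.Int.floordiv L k
  let list_num : List Int := []
  if L > k then
    -- loop post number
    let list_num :=
      (PySem.List.pyRange 0 (k - 1) 1).foldl
        (fun acc i => (PySem.List.pyRange 0 n 1).foldl (fun acc2 _j => acc2 ++ [i]) acc)
        list_num
    -- loop last number overwise
    let last_other : Int := L - (list_num.length : Int)
    (PySem.List.pyRange 0 last_other 1).foldl (fun acc _a => acc ++ [k - 1]) list_num
  else
    (PySem.List.pyRange 0 L 1).foldl (fun acc i => acc ++ [i]) list_num

-- ===== PORT B =====
def ref_string_sorted_alt (L : Int) (k : Int) : List Int :=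
  let n := PySem.Int.floordiv L k
  if L > k then
    (PySem.List.pyRange 0 L 1).map (fun i => min (PySem.Int.floordiv i n) (k - 1))
  else
    PySem.List.pyRange 0 L 1

-- ===== PRECONDITION & SPEC =====
-- Pre_ excludes exactly k = 0, on which Python A raises ZeroDivisionError (n = L//k).
def Pre_ref_string_sorted (L : Int) (k : Int) : Prop := k ≠ 0
instance (L : Int) (k : Int) : Decidable (Pre_ref_string_sorted L k) := by
  unfold Pre_ref_string_sorted; infer_instance
def pvWitness_ref_string_sorted : Int × Int := (10, 3)

def Spec_ref_string_sorted (L : Int) (k : Int) (out : List Int) : Prop := out = ref_string_sorted_alt L k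
instance (L : Int) (k : Int) (out : List Int) : Decidable (Spec_ref_string_sorted L k out) := by unfold Spec_ref_string_sorted; infer_instance

-- ===== CLAIM (what is proved, stated in full; the proofs are below) =====
def Claim_equal_ref_string_sorted : Prop := ∀ (L : Int) (k : Int), Dom_ref_string_sorted L k → Pre_ref_string_sorted L k → Spec_ref_string_sorted L k (ref_string_sorted L k)

-- ===== LEMMAS AND PROOFS =====

-- For k < 0 and 0 ≤ i < L, floor(i / (L//k)) never drops below k - 1.
lemma fd_lb (i n L k : Int) (hk : k < 0) (hi : 0 ≤ i) (hiL : i < L)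
    (hn : n = PySem.Int.floordiv L k) : k - 1 ≤ PySem.Int.floordiv i n := by
  have hK : (0:Int) < -k := by omega
  have hnn : n = PySem.Int.floordiv (-L) (-k) := by
    rw [hn, PySem.Int.floordiv_neg_neg]
  have hb := (PySem.Int.floordiv_eq_iff_of_pos hK).mp hnn.symm
  have hL0 : 0 < L := by omega
  have hnneg : n < 0 := by nlinarith [hb.1, hb.2]
  have hfd : PySem.Int.floordiv i n = PySem.Int.floordiv (-i) (-n) := by
    rw [PySem.Int.floordiv_neg_neg]
  have hn0 : (0:Int) < -n := by omega
  set q := PySem.Int.floordiv (-i) (-n) with hq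
  have hqb := (PySem.Int.floordiv_eq_iff_of_pos hn0).mp hq.symm
  rw [hfd]
  by_contra hcon
  have h1 : (0:Int) ≤ -(k - 1) - (q + 1) := by omega
  have h2 : (0:Int) ≤ -n := by omega
  nlinarith [hqb.1, hqb.2, hb.1, mul_nonneg h1 h2]

-- Concatenating m blocks of n copies each equals a flat indexed pass over range(m*n).
lemma blocks (n : Int) (hn : 0 < n) (m : Int) (hm : 0 ≤ m) :
    (PySem.List.pyRange 0 m 1).flatMap (fun i => List.replicate n.toNat i)
      = (PySem.List.pyRange 0 (m * n) 1).map (fun p => PySem.Int.floordiv p n) := by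
  induction m, hm using Int.le_induction with
  | base => simp [PySem.List.pyRange_one_eq_nil]
  | succ m hm ih =>
    have hsplit : PySem.List.pyRange 0 ((m + 1) * n) 1
        = PySem.List.pyRange 0 (m * n) 1 ++ PySem.List.pyRange (m * n) ((m + 1) * n) 1 := by
      refine PySem.List.pyRange_one_append 0 (m * n) ((m + 1) * n) (by positivity) (by nlinarith)
    rw [PySem.List.pyRange_one_succ_right hm, List.flatMap_append, ih, hsplit, List.map_append]
    congr 1
    have hcong : (PySem.List.pyRange (m * n) ((m + 1) * n) 1).map
        (fun p => PySem.Int.floordiv p n)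
        = (PySem.List.pyRange (m * n) ((m + 1) * n) 1).map (fun _ => m) := by
      refine List.map_congr_left ?_
      intro p hp
      rw [PySem.List.mem_pyRange_one] at hp
      exact (PySem.Int.floordiv_eq_iff_of_pos hn).mpr ⟨hp.1, hp.2⟩
    rw [hcong, List.map_const', PySem.List.length_pyRange_one]
    have : ((m + 1) * n - m * n).toNat = n.toNat := by
      congr 1; ring
    rw [this]
    simp [List.flatMap_cons]

-- ===== VERDICT (by name: the statement is the Claim_ definition above) =====
theorem ref_string_sorted_spec : Claim_equal_ref_string_sorted := by
  intro L k _hdom hk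
  unfold Pre_ref_string_sorted at hk
  unfold Spec_ref_string_sorted ref_string_sorted ref_string_sorted_alt
  dsimp only
  set n := PySem.Int.floordiv L k with hn
  by_cases hLk : L > k
  · simp only [if_pos hLk]
    simp only [PySem.List.foldl_append_singleton_eq_map, List.map_const',
      PySem.List.length_pyRange_one]
    rw [PySem.List.foldl_append_eq_flatMap]
    simp only [List.nil_append, Int.sub_zero]
    by_cases hk2 : 2 ≤ k
    · -- k ≥ 2: n ≥ 1, the block structure is real
      have hkpos : (0:Int) < k := by omega
      have hn1 : 1 ≤ n := by
        rw [hn]; exact (PySem.Int.le_floordiv_iff_mul_le hkpos).mpr (by omega)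
      have hnk : n * k ≤ L := (PySem.Int.le_floordiv_iff_mul_le hkpos).mp (le_of_eq hn)
      have hM0 : 0 ≤ (k - 1) * n := by nlinarith
      have hML : (k - 1) * n ≤ L := by nlinarith
      rw [blocks n (by omega) (k - 1) (by omega)]
      have hlen : (List.map (fun p => PySem.Int.floordiv p n)
          (PySem.List.pyRange 0 ((k - 1) * n) 1)).length = ((k - 1) * n).toNat := by
        simp [PySem.List.length_pyRange_one]
      rw [hlen, Int.toNat_of_nonneg hM0,
        PySem.List.pyRange_one_append 0 ((k - 1) * n) L hM0 hML, List.map_append]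
      congr 1
      · refine List.map_congr_left ?_
        intro p hp
        rw [PySem.List.mem_pyRange_one] at hp
        have : PySem.Int.floordiv p n < k - 1 :=
          (PySem.Int.floordiv_lt_iff_lt_mul (by omega)).mpr hp.2
        simp [min_eq_left (le_of_lt this)]
      · have hcong : (PySem.List.pyRange ((k - 1) * n) L 1).map
            (fun i => min (PySem.Int.floordiv i n) (k - 1))
            = (PySem.List.pyRange ((k - 1) * n) L 1).map (fun _ => k - 1) := by
          refine List.map_congr_left ?_
          intro p hp
          rw [PySem.List.mem_pyRange_one] at hp
          have : k - 1 ≤ PySem.Int.floordiv p n :=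
            (PySem.Int.le_floordiv_iff_mul_le (by omega)).mpr hp.1
          simp [min_eq_right this]
        rw [hcong, List.map_const', PySem.List.length_pyRange_one]
    · -- k ≤ 1, k ≠ 0: the block loop is empty, every entry is k - 1
      have hempty : PySem.List.pyRange 0 (k - 1) 1 = [] :=
        PySem.List.pyRange_one_eq_nil (by omega)
      rw [hempty]
      simp only [List.flatMap_nil, List.nil_append, List.length_nil]
      have hcong : (PySem.List.pyRange 0 L 1).map
          (fun i => min (PySem.Int.floordiv i n) (k - 1))
          = (PySem.List.pyRange 0 L 1).map (fun _ => k - 1) := by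
        refine List.map_congr_left ?_
        intro i hi
        rw [PySem.List.mem_pyRange_one] at hi
        rcases Int.lt_or_le k 0 with hkneg | hkpos
        · exact min_eq_right (fd_lb i n L k hkneg hi.1 hi.2 hn)
        · -- k = 1: n = L and floordiv i L = 0
          have hk1 : k = 1 := by omega
          subst hk1
          have hnL : n = L := by
            rw [hn]
            exact (PySem.Int.floordiv_eq_iff_of_pos (by omega)).mpr (by constructor <;> omega)
          have : PySem.Int.floordiv i n = 0 := by
            rw [hnL]
            exact (PySem.Int.floordiv_eq_iff_of_pos (by omega)).mpr (by constructor <;> omega)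
          simp [this]
      rw [hcong, List.map_const', PySem.List.length_pyRange_one]
      norm_num
  · simp only [if_neg hLk, PySem.List.foldl_append_singleton_eq_self, List.nil_append]
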